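-- pv_equiv track=rewrite | github.com/jmerkle/adventOfCode2023 | 12/functions_day_12.py | generate_possible_remaining_records
-- ===== SOURCE A (Python) =====
-- def record_could_start_with(record: str, check_value: int) -> bool:
--     if "." not in record[0:check_value]:
--         if len(record) > check_value and record[check_value] == "#":
--             return False
--         return True
--     return False
--
-- def generate_possible_remaining_records(record: str, check_value: int, min_size:int = 0) -> list[str]:
--     if len(record) < check_value or len(record) < min_size:
--         return []
--     if len(record) == check_value:
--         if record_could_start_with(record, check_value):
--             return [""]
--         else:
--             return []
--     remaining = []
--     if record_could_start_with(record, check_value):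
--         remaining = [record[check_value+1:]]
--     if record[0] == "#":
--         return remaining
--     else:
--         return remaining + generate_possible_remaining_records(record[1:], check_value, min_size)
-- ===== SOURCE B (Python) =====
-- def record_could_start_with(record: str, check_value: int) -> bool:
--     if "." not in record[0:check_value]:
--         if len(record) > check_value and record[check_value] == "#":
--             return False
--         return True
--     return False
--
-- def generate_possible_remaining_records(record: str, check_value: int, min_size: int = 0) -> list[str]:
--     # Stage 1: collect the suffixes the scan visits (stop on length guard,
--     # exact-length suffix, or a suffix starting with '#').
--     subs = []
--     sub = record
--     while True:
--         if len(sub) < check_value or len(sub) < min_size: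
--             break
--         subs.append(sub)
--         if len(sub) == check_value or sub[0] == "#":
--             break
--         sub = sub[1:]
--     # Stage 2: each visited suffix that can start with the block contributes
--     # its remainder after the block and the separating character.
--     return [("" if len(sub) == check_value else sub[check_value + 1:])
--             for sub in subs if record_could_start_with(sub, check_value)]
-- ===== Notes on version B (the rewrite author's own statement) =====
-- stated objective: alternative
-- what changed: Replaced A's linear recursion (which interleaves placement tests with the scan and concatenates each level's singleton onto the recursive result) by a two-stage pipeline: stage 1 collects the list of suffixes the scan visits (stopping on the length guard, the exact-length suffix, or a leading '#'), stage 2 is a single comprehension mapping each visited suffix that can start with the block to its remainder.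
import Mathlib
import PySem

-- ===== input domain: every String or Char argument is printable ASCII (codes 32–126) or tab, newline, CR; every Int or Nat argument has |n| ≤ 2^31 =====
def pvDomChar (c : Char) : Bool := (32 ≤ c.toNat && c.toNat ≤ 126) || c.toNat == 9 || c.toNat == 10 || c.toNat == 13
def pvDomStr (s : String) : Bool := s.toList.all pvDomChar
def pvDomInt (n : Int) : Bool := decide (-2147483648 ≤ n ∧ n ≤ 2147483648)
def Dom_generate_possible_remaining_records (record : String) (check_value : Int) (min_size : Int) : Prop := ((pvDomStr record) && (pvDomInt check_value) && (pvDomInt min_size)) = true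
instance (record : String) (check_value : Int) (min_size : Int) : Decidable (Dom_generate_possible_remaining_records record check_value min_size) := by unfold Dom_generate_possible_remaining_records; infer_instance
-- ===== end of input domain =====

-- B replaces A's linear recursion by a two-stage pipeline (collect the visited
-- suffixes, then map each admissible one to its remainder); objective: alternative.

-- ===== PORT A =====
-- shared module helper record_could_start_with (used verbatim by both Pythons).
-- record[check_value] is PySem.List.pyGet?; where Python raises IndexError it is none,
-- and the comparison with '#' is then false (those inputs lie outside Pre_).
def pvRcsw (r : List Char) (cv : Int) : Bool :=
  if '.' ∈ PySem.List.slice r (some 0) (some cv) then false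
  else if cv < (r.length : Int) ∧ PySem.List.pyGet? r cv = some '#' then false
  else true

def pvGenA (cv ms : Int) : List Char → List String
  | [] =>
      if (0:Int) < cv ∨ (0:Int) < ms then []
      else if (0:Int) = cv then (if pvRcsw [] cv then [""] else [])
      else -- Python raises here (record_could_start_with indexes an empty string); outside Pre_
        if pvRcsw [] cv then [String.ofList (PySem.List.slice ([] : List Char) (some (cv+1)) none)] else []
  | c :: rest =>
      if ((c :: rest).length : Int) < cv ∨ ((c :: rest).length : Int) < ms then []
      else if ((c :: rest).length : Int) = cv then (if pvRcsw (c :: rest) cv then [""] else [])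
      else
        let remaining := if pvRcsw (c :: rest) cv then [String.ofList (PySem.List.slice (c :: rest) (some (cv+1)) none)] else []
        if c = '#' then remaining else remaining ++ pvGenA cv ms rest

def generate_possible_remaining_records (record : String) (check_value : Int) (min_size : Int) : List String :=
  pvGenA check_value min_size record.toList

-- ===== PORT B =====
-- Stage 1 of B: the list of suffixes the scan visits; the while-loop breaks become
-- the terminating branches ([] for the length guard, a final singleton for the
-- exact-length or leading-'#' stops).
def pvStarts (cv ms : Int) : List Char → List (List Char)
  | [] =>
      if (0:Int) < cv ∨ (0:Int) < ms then []
      else [[]]   -- "" is appended; the next step (len==cv, or ""[0] raising outside Pre_) stops the loop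
  | c :: rest =>
      if ((c :: rest).length : Int) < cv ∨ ((c :: rest).length : Int) < ms then []
      else if ((c :: rest).length : Int) = cv ∨ c = '#' then [c :: rest]
      else (c :: rest) :: pvStarts cv ms rest

-- Stage 2 of B: the comprehension body for one visited suffix.
def pvContrib (cv : Int) (sub : List Char) : Option String :=
  if pvRcsw sub cv then
    some (if (sub.length : Int) = cv then "" else String.ofList (PySem.List.slice sub (some (cv+1)) none))
  else none

def generate_possible_remaining_records_alt (record : String) (check_value : Int) (min_size : Int) : List String :=
  (pvStarts check_value min_size record.toList).filterMap (pvContrib check_value)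

-- ===== PRECONDITION & SPEC =====
-- Pre_ excludes exactly the inputs where Python A (and Python B alike) raises IndexError:
-- a negative check_value whose scan is stopped neither by the min_size guard nor by a
-- leading '#' before the suffix becomes shorter than |check_value|.
def Pre_generate_possible_remaining_records (record : String) (check_value : Int) (min_size : Int) : Prop :=
  ¬ (check_value < 0 ∧ min_size ≤ (record.toList.length : Int) ∧ min_size ≤ -check_value - 1 ∧
     '#' ∉ record.toList.take ((record.toList.length : Int) + check_value + 1).toNat)
instance (record : String) (check_value : Int) (min_size : Int) : Decidable (Pre_generate_possible_remaining_records record check_value min_size) := by unfold Pre_generate_possible_remaining_records; infer_instance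

def pvWitness_generate_possible_remaining_records : String × Int × Int := ("?#.#?", 1, 0)

def Spec_generate_possible_remaining_records (record : String) (check_value : Int) (min_size : Int) (out : List String) : Prop := out = generate_possible_remaining_records_alt record check_value min_size
instance (record : String) (check_value : Int) (min_size : Int) (out : List String) : Decidable (Spec_generate_possible_remaining_records record check_value min_size out) := by unfold Spec_generate_possible_remaining_records; infer_instance

-- ===== CLAIM (what is proved, stated in full; the proofs are below) =====
def Claim_equal_generate_possible_remaining_records : Prop := ∀ (record : String) (check_value : Int) (min_size : Int), Dom_generate_possible_remaining_records record check_value min_size → Pre_generate_possible_remaining_records record check_value min_size → Spec_generate_possible_remaining_records record check_value min_size (generate_possible_remaining_records record check_value min_size)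

-- ===== LEMMAS AND PROOFS =====
-- Fusion: mapping pvContrib over the visited suffixes is A's recursion.
theorem pvStarts_filterMap_eq (cv ms : Int) (sub : List Char) :
    (pvStarts cv ms sub).filterMap (pvContrib cv) = pvGenA cv ms sub := by
  induction sub with
  | nil =>
      simp only [pvStarts, pvGenA, pvContrib]
      split_ifs <;> simp_all
  | cons c rest ih =>
      simp only [pvStarts, pvGenA]
      split_ifs <;> simp_all [pvContrib]

-- ===== VERDICT (by name: the statement is the Claim_ definition above) =====
theorem generate_possible_remaining_records_spec : Claim_equal_generate_possible_remaining_records := by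
  intro record cv ms _ _
  unfold Spec_generate_possible_remaining_records generate_possible_remaining_records generate_possible_remaining_records_alt
  rw [pvStarts_filterMap_eq]
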